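-- pv_equiv track=rewrite | github.com/Hemaditya05/Chess-based-Encyption | backend/chessperm.py | _rook_diffusion
-- ===== SOURCE A (Python) =====
-- import math
--
-- def _rotate(arr: list[int], n: int) -> list[int]:
--     n %= len(arr)
--     return arr[n:] + arr[:n]
--
-- def _rook_diffusion(block: list[int]) -> list[int]:
--     size = int(math.isqrt(len(block)))
--     out = block.copy()
--     # rows
--     for r in range(size):
--         start = r * size
--         row = out[start:start+size]
--         shift = sum(row) % size
--         out[start:start+size] = _rotate(row, shift)
--     # columns
--     for c in range(size):
--         col = [out[r*size + c] for r in range(size)]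
--         shift = sum(col) % size
--         rotated = _rotate(col, shift)
--         for r in range(size):
--             out[r*size + c] = rotated[r]
--     return out
-- ===== SOURCE B (Python) =====
-- import math
--
-- def _rook_diffusion(block: list[int]) -> list[int]:
--     # Closed-form index mapping: no rotation, slicing or intermediate matrix is ever built.
--     # Row rotation leaves row sums unchanged, so rshift[r] is computable from block directly;
--     # the value of column c after the row phase at row r is block[r*s + (c+rshift[r])%s],
--     # which gives cshift[c]; the final element at (r,c) is then read straight out of block.
--     s = math.isqrt(len(block))
--     if s == 0:
--         return block.copy()
--     rshift = [sum(block[r*s:(r+1)*s]) % s for r in range(s)]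
--     cshift = [sum(block[r*s + (c + rshift[r]) % s] for r in range(s)) % s
--               for c in range(s)]
--     out = []
--     for r in range(s):
--         for c in range(s):
--             r2 = (r + cshift[c]) % s
--             out.append(block[r2*s + (c + rshift[r2]) % s])
--     return out + block[s*s:]
-- ===== Notes on version B (the rewrite author's own statement) =====
-- stated objective: alternative
-- what changed: B never rotates or rewrites anything: it precomputes the row shifts (row sums are rotation-invariant) and the column shifts, then emits each output element by a closed-form index mapping straight from the original block, whereas A performs two in-place rotate-and-write-back passes over a working buffer.
import Mathlib
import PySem

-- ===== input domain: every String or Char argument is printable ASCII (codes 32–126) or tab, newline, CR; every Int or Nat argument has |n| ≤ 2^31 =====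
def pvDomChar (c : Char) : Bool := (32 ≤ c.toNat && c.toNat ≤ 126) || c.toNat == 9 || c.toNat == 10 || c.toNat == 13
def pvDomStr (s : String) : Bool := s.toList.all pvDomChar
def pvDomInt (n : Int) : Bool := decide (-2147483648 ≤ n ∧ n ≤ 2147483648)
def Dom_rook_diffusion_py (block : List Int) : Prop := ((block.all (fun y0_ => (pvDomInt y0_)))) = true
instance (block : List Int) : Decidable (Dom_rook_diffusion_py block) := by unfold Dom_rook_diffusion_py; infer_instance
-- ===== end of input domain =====

-- B replaces A's two rotate-and-write-back passes over a working buffer by precomputed shift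
-- tables and a closed-form index mapping reading each output element straight from the input ('alternative').

-- ===== PORT A =====
-- _rotate(arr, n): n %= len(arr); arr[n:] + arr[:n]

def pvRotate (arr : List Int) (n : Int) : List Int :=
  let n := PySem.Int.mod n ((arr.length : Nat) : Int)
  PySem.List.slice arr (some n) none ++ PySem.List.slice arr none (some n)

-- out[start:start+size] = _rotate(row, shift) is a slice assignment of an equal-length
-- list: ported exactly as prefix ++ replacement ++ suffix; all indices read/written are in range.

def rook_diffusion_py (block : List Int) : List Int :=
  let size : Nat := Nat.sqrt block.length
  let out := block
  let out := (PySem.List.pyRange 0 (size : Int) 1).foldl (fun out r =>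
    let start := r * (size : Int)
    let row := PySem.List.slice out (some start) (some (start + (size : Int)))
    let shift := PySem.Int.mod row.sum (size : Int)
    PySem.List.slice out none (some start) ++ pvRotate row shift ++
      PySem.List.slice out (some (start + (size : Int))) none) out
  (PySem.List.pyRange 0 (size : Int) 1).foldl (fun out c =>
    let col := (PySem.List.pyRange 0 (size : Int) 1).map (fun r =>
      PySem.List.pyGetD out (r * (size : Int) + c) 0)
    let shift := PySem.Int.mod col.sum (size : Int)
    let rotated := pvRotate col shift
    (PySem.List.pyRange 0 (size : Int) 1).foldl (fun out r =>
      PySem.List.pySetD out (r * (size : Int) + c) (PySem.List.pyGetD rotated r 0)) out) out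

-- ===== PORT B =====
-- rshift[r] = sum(block[r*s:(r+1)*s]) % s ; cshift[c] = sum(block[r*s+(c+rshift[r])%s] for r) % s ;
-- out[r*s+c] = block[r2*s+(c+rshift[r2])%s] with r2 = (r+cshift[c])%s ; plus the untouched tail.

def rook_diffusion_py_alt (block : List Int) : List Int :=
  let s : Nat := Nat.sqrt block.length
  if s = 0 then block
  else
    let rshift := (PySem.List.pyRange 0 (s : Int) 1).map (fun r =>
      PySem.Int.mod (PySem.List.slice block (some (r * (s : Int))) (some ((r + 1) * (s : Int)))).sum (s : Int))
    let cshift := (PySem.List.pyRange 0 (s : Int) 1).map (fun c =>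
      PySem.Int.mod ((PySem.List.pyRange 0 (s : Int) 1).map (fun r =>
        PySem.List.pyGetD block (r * (s : Int) + PySem.Int.mod (c + PySem.List.pyGetD rshift r 0) (s : Int)) 0)).sum (s : Int))
    let out := (PySem.List.pyRange 0 (s : Int) 1).flatMap (fun r =>
      (PySem.List.pyRange 0 (s : Int) 1).map (fun c =>
        let r2 := PySem.Int.mod (r + PySem.List.pyGetD cshift c 0) (s : Int)
        PySem.List.pyGetD block (r2 * (s : Int) + PySem.Int.mod (c + PySem.List.pyGetD rshift r2 0) (s : Int)) 0))
    out ++ PySem.List.slice block (some ((s * s : Nat) : Int)) none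

-- ===== PRECONDITION & SPEC =====
def Spec_rook_diffusion_py (block : List Int) (out : List Int) : Prop := out = rook_diffusion_py_alt block
instance (block : List Int) (out : List Int) : Decidable (Spec_rook_diffusion_py block out) := by unfold Spec_rook_diffusion_py; infer_instance

-- ===== CLAIM (what is proved, stated in full; the proofs are below) =====
def Claim_equal_rook_diffusion_py : Prop := ∀ (block : List Int), Dom_rook_diffusion_py block → Spec_rook_diffusion_py block (rook_diffusion_py block)

-- ===== LEMMAS AND PROOFS =====

def pvRot (s : Nat) (xs : List Int) : List Int :=
  xs.drop (PySem.Int.mod xs.sum (s : Int)).toNat ++ xs.take (PySem.Int.mod xs.sum (s : Int)).toNat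

def pvChunk (block : List Int) (s r : Nat) : List Int := (block.drop (r * s)).take s

def pvMval (block : List Int) (s r c : Nat) : Int := (pvRot s (pvChunk block s r)).getD c 0

def pvColM (block : List Int) (s c : Nat) : List Int := (List.range s).map (fun r => pvMval block s r c)

def pvMFval (block : List Int) (s r c : Nat) : Int := (pvRot s (pvColM block s c)).getD r 0

def pvMrow (block : List Int) (s k r : Nat) : List Int :=
  (List.range s).map (fun c => if c < k then pvMFval block s r c else pvMval block s r c)

def pvRotChunks (s : Nat) : Nat → List Int → List Int
  | 0, R => R
  | m+1, R => pvRot s (R.take s) ++ pvRotChunks s m (R.drop s)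

def pvRowStep (s : Nat) (out : List Int) (k : Nat) : List Int :=
  let row := (out.drop (k * s)).take s
  out.take (k * s) ++ pvRotate row (PySem.Int.mod row.sum (s : Int)) ++ out.drop (k * s + s)

def pvColStep (s : Nat) (out : List Int) (c : Nat) : List Int :=
  let col := (List.range s).map (fun r => out.getD (r * s + c) 0)
  let rotated := pvRotate col (PySem.Int.mod col.sum (s : Int))
  (List.range s).foldl (fun out r => out.set (r * s + c) (rotated.getD r 0)) out

def pvRk (block : List Int) (s r : Nat) : Nat := (PySem.Int.mod (pvChunk block s r).sum (s : Int)).toNat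

def pvCk (block : List Int) (s c : Nat) : Nat := (PySem.Int.mod (pvColM block s c).sum (s : Int)).toNat

theorem pvRange_cast (s : Nat) : PySem.List.pyRange 0 (s : Int) 1 = (List.range s).map (fun (k : Nat) => (k : Int)) := by
  rw [PySem.List.pyRange_one]; simp

theorem length_pvRot (s : Nat) (xs : List Int) : (pvRot s xs).length = xs.length := by
  simp [pvRot]; omega

theorem pvRotate_eq_pvRot (s : Nat) (hs : 0 < s) (xs : List Int) (h : xs.length = s) :
    pvRotate xs (PySem.Int.mod xs.sum (s : Int)) = pvRot s xs := by
  have hsp : (0 : Int) < (s : Int) := by exact_mod_cast hs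
  have h1 := PySem.Int.mod_nonneg xs.sum hsp
  have h2 := PySem.Int.mod_lt xs.sum hsp
  have hm : PySem.Int.mod (PySem.Int.mod xs.sum (s:Int)) ((xs.length : Nat) : Int)
      = PySem.Int.mod xs.sum (s:Int) := by
    rw [h, PySem.Int.mod_eq_emod_of_pos hsp]
    exact Int.emod_eq_of_lt h1 h2
  simp only [pvRotate, hm]
  rw [PySem.List.slice_from _ h1, PySem.List.slice_to _ h1]
  rfl

theorem map_range_getD (s : Nat) (l : List Int) (d : Int) (h : l.length = s) :
    (List.range s).map (fun i => l.getD i d) = l := by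
  apply List.ext_getElem?
  intro i
  simp only [List.getElem?_map]
  by_cases hi : i < s
  · simp [hi, List.getElem?_eq_getElem (show i < l.length by omega)]
  · simp [hi, List.getElem?_eq_none (show l.length ≤ i by omega)]

theorem set_map_range (s k : Nat) (f : Nat → Int) (x : Int) (hk : k < s) :
    ((List.range s).map f).set k x = (List.range s).map (fun c => if c = k then x else f c) := by
  apply List.ext_getElem?
  intro i
  simp only [List.getElem?_set, List.getElem?_map]
  by_cases hik : i = k
  · subst hik; simp [hk]
  · have hki : ¬ (k = i) := fun h => hik h.symm
    by_cases his : i < s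
    · simp [hki, his, hik]
    · simp [hki, his]

theorem chunk_length (block : List Int) (s r : Nat) (hr : r < s) (hn : s * s ≤ block.length) :
    (pvChunk block s r).length = s := by
  have h1 : (r + 1) * s ≤ s * s := Nat.mul_le_mul_right s (by omega)
  have h2 : r * s + s ≤ block.length := by
    have : (r + 1) * s = r * s + s := by ring
    omega
  simp [pvChunk]
  omega

theorem mrow_zero (block : List Int) (s r : Nat) (hr : r < s) (hn : s * s ≤ block.length) :
    pvMrow block s 0 r = pvRot s (pvChunk block s r) := by
  unfold pvMrow pvMval
  simp only [Nat.not_lt_zero, if_false]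
  exact map_range_getD s _ 0 (by rw [length_pvRot]; exact chunk_length block s r hr hn)

theorem rowloop (s : Nat) (hs : 0 < s) : ∀ (m k : Nat) (P R : List Int), P.length = k * s → m * s ≤ R.length →
    (List.range' k m).foldl (pvRowStep s) (P ++ R) = P ++ pvRotChunks s m R := by
  intro m
  induction m with
  | zero => intro k P R hP hR; simp [pvRotChunks]
  | succ m ih =>
    intro k P R hP hR
    rw [Nat.succ_mul] at hR
    have hdrop : (P ++ R).drop (k * s) = R := by rw [← hP]; exact List.drop_left
    have htake : (P ++ R).take (k * s) = P := by rw [← hP]; exact List.take_left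
    have hdrop2 : (P ++ R).drop (k * s + s) = R.drop s := by
      rw [← hP]; exact List.drop_length_add_append s
    have hrowlen : (R.take s).length = s := by rw [List.length_take]; omega
    rw [List.range'_succ, List.foldl_cons]
    have hstep : pvRowStep s (P ++ R) k = (P ++ pvRot s (R.take s)) ++ R.drop s := by
      simp only [pvRowStep, hdrop, htake, hdrop2, pvRotate_eq_pvRot s hs _ hrowlen, List.append_assoc]
    rw [hstep, ih (k+1) _ _ (by simp [length_pvRot, hP, Nat.succ_mul]; omega)
        (by simp [List.length_drop]; omega)]
    simp [pvRotChunks, List.append_assoc]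

theorem rotChunks_eq (s : Nat) (block : List Int) : ∀ (m k : Nat),
    pvRotChunks s m (block.drop (k * s)) =
      ((List.range' k m).map (fun r => pvRot s (pvChunk block s r))).flatten ++ block.drop ((k + m) * s) := by
  intro m
  induction m with
  | zero => intro k; simp [pvRotChunks]
  | succ m ih =>
    intro k
    rw [List.range'_succ, List.map_cons, List.flatten_cons]
    show pvRot s ((block.drop (k*s)).take s) ++ pvRotChunks s m ((block.drop (k*s)).drop s) = _
    rw [List.drop_drop]
    have h1 : k * s + s = (k+1) * s := by ring
    have h2 : (k + (m+1)) * s = ((k+1) + m) * s := by ring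
    rw [h1, h2, ih (k+1)]
    simp [pvChunk, List.append_assoc]

theorem colread (s c : Nat) (L : List Int) (hc : c < s) : ∀ (m k0 : Nat) (g : Nat → List Int) (P : List Int),
    P.length = k0 * s → (∀ r, (g r).length = s) →
    (List.range' k0 m).map (fun r => (P ++ ((List.range' k0 m).map g).flatten ++ L).getD (r * s + c) 0)
      = (List.range' k0 m).map (fun r => (g r).getD c 0) := by
  intro m
  induction m with
  | zero => intro k0 g P hP hg; simp
  | succ m ih =>
    intro k0 g P hP hg
    rw [List.range'_succ]
    simp only [List.map_cons, List.flatten_cons]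
    congr 1
    · rw [List.getD_eq_getElem?_getD]
      have h0 : P ++ (g k0 ++ ((List.range' (k0+1) m).map g).flatten) ++ L
          = P ++ (g k0 ++ (((List.range' (k0+1) m).map g).flatten ++ L)) := by
        simp [List.append_assoc]
      rw [h0, List.getElem?_append_right (show P.length ≤ k0 * s + c by omega)]
      have h1 : k0 * s + c - P.length = c := by omega
      rw [h1, List.getElem?_append_left (show c < (g k0).length by rw [hg k0]; exact hc)]
      rw [← List.getD_eq_getElem?_getD]
    · have hout : P ++ (g k0 ++ ((List.range' (k0+1) m).map g).flatten) ++ L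
          = (P ++ g k0) ++ ((List.range' (k0+1) m).map g).flatten ++ L := by
        simp [List.append_assoc]
      rw [hout]
      exact ih (k0+1) g (P ++ g k0) (by simp [hP, hg, Nat.succ_mul]) hg

theorem colwrite (s c : Nat) (v : List Int) (L : List Int) (hc : c < s) :
    ∀ (m k0 : Nat) (g : Nat → List Int) (P : List Int), P.length = k0 * s → (∀ r, (g r).length = s) →
    (List.range' k0 m).foldl (fun out r => out.set (r * s + c) (v.getD r 0)) (P ++ ((List.range' k0 m).map g).flatten ++ L)
      = P ++ ((List.range' k0 m).map (fun r => (g r).set c (v.getD r 0))).flatten ++ L := by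
  intro m
  induction m with
  | zero => intro k0 g P hP hg; simp
  | succ m ih =>
    intro k0 g P hP hg
    rw [List.range'_succ]
    simp only [List.map_cons, List.flatten_cons, List.foldl_cons]
    have h0 : P ++ (g k0 ++ ((List.range' (k0+1) m).map g).flatten) ++ L
        = P ++ (g k0 ++ (((List.range' (k0+1) m).map g).flatten ++ L)) := by
      simp [List.append_assoc]
    have hset : (P ++ (g k0 ++ ((List.range' (k0+1) m).map g).flatten) ++ L).set (k0 * s + c) (v.getD k0 0)
        = (P ++ (g k0).set c (v.getD k0 0)) ++ ((List.range' (k0+1) m).map g).flatten ++ L := by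
      rw [h0, List.set_append_right _ _ (show P.length ≤ k0 * s + c by omega)]
      have h1 : k0 * s + c - P.length = c := by omega
      rw [h1, List.set_append_left _ _ (show c < (g k0).length by rw [hg k0]; exact hc)]
      simp [List.append_assoc]
    rw [hset, ih (k0+1) g (P ++ (g k0).set c (v.getD k0 0)) (by simp [hP, hg, Nat.succ_mul]) hg]
    simp [List.append_assoc]

theorem colphase (block : List Int) (s : Nat) (hs : 0 < s) (L : List Int) : ∀ (m k : Nat), k + m = s →
    (List.range' k m).foldl (pvColStep s) (((List.range s).map (pvMrow block s k)).flatten ++ L)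
      = ((List.range s).map (pvMrow block s s)).flatten ++ L := by
  intro m
  induction m with
  | zero =>
    intro k hk
    have hks : k = s := by omega
    subst hks
    simp
  | succ m ih =>
    intro k hk
    have hks : k < s := by omega
    rw [List.range'_succ, List.foldl_cons]
    have hglen : ∀ r, (pvMrow block s k r).length = s := by intro r; simp [pvMrow]
    have hstep : pvColStep s (((List.range s).map (pvMrow block s k)).flatten ++ L) k
        = ((List.range s).map (pvMrow block s (k+1))).flatten ++ L := by
      simp only [pvColStep]
      have hcol : (List.range s).map (fun r => (((List.range s).map (pvMrow block s k)).flatten ++ L).getD (r * s + k) 0)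
          = pvColM block s k := by
        have h := colread s k L hks s 0 (pvMrow block s k) [] (by simp) hglen
        simp only [List.nil_append] at h
        rw [List.range_eq_range', h, ← List.range_eq_range']
        unfold pvColM
        apply List.map_congr_left
        intro r hr
        unfold pvMrow
        rw [PySem.List.getD_map_range _ s k 0 hks]
        simp
      rw [hcol]
      have hcollen : (pvColM block s k).length = s := by simp [pvColM]
      rw [pvRotate_eq_pvRot s hs _ hcollen]
      have hw := colwrite s k (pvRot s (pvColM block s k)) L hks s 0 (pvMrow block s k) [] (by simp) hglen
      simp only [List.nil_append] at hw
      rw [List.range_eq_range', hw, ← List.range_eq_range']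
      congr 1
      apply congrArg
      apply List.map_congr_left
      intro r hr
      unfold pvMrow
      rw [set_map_range s k _ _ hks]
      apply List.map_congr_left
      intro c hcm
      by_cases hck : c = k
      · subst hck; simp [pvMFval]
      · have : (c < k + 1) = (c < k) := by
          apply propext; constructor <;> intro h <;> omega
        simp [hck, this]
    rw [hstep, ih (k+1) (by omega)]

theorem portA_eq (block : List Int) :
    rook_diffusion_py block =
      (List.range (Nat.sqrt block.length)).foldl (pvColStep (Nat.sqrt block.length))
        ((List.range (Nat.sqrt block.length)).foldl (pvRowStep (Nat.sqrt block.length)) block) := by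
  simp only [rook_diffusion_py]
  rw [pvRange_cast]
  simp only [List.foldl_map, List.map_map, Function.comp_def]
  simp only [← Nat.cast_mul, ← Nat.cast_add,
    PySem.List.pyGetD_natCast, PySem.List.pySetD_natCast,
    PySem.List.slice_to_natCast, PySem.List.slice_natCast, PySem.List.slice_from_natCast,
    Nat.add_sub_cancel_left]
  rfl

-- ===== new B-side lemmas: closed-form index mapping =====

theorem natMod_cast (a b : Nat) (hb : 0 < b) :
    PySem.Int.mod ((a : Nat) : Int) ((b : Nat) : Int) = (((a % b : Nat)) : Int) := by
  rw [PySem.Int.mod_eq_emod_of_pos (by exact_mod_cast hb)]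
  exact (Int.natCast_mod a b).symm

theorem getD_pvRot (s : Nat) (hs : 0 < s) (xs : List Int) (h : xs.length = s) (i : Nat) (hi : i < s) :
    (pvRot s xs).getD i 0 = xs.getD ((i + (PySem.Int.mod xs.sum (s : Int)).toNat) % s) 0 := by
  have hsp : (0 : Int) < (s : Int) := by exact_mod_cast hs
  set k := (PySem.Int.mod xs.sum (s : Int)).toNat with hkdef
  have hk : k < s := by
    have := PySem.Int.mod_lt xs.sum hsp
    omega
  have hdl : (xs.drop k).length = s - k := by simp [h]
  rw [List.getD_eq_getElem?_getD, List.getD_eq_getElem?_getD]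
  unfold pvRot
  rw [← hkdef]
  by_cases hcase : i < s - k
  · rw [List.getElem?_append_left (by omega : i < (xs.drop k).length)]
    rw [List.getElem?_drop]
    have : (i + k) % s = k + i := by
      rw [Nat.mod_eq_of_lt (by omega)]; omega
    rw [this]
  · rw [List.getElem?_append_right (by omega : (xs.drop k).length ≤ i)]
    have hj : i - (xs.drop k).length = i + k - s := by omega
    rw [hj]
    have hjk : i + k - s < k := by omega
    rw [List.getElem?_take_of_lt hjk]
    have : (i + k) % s = i + k - s := by
      rw [Nat.mod_eq_sub_mod (by omega), Nat.mod_eq_of_lt (by omega)]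
    rw [this]

theorem chunk_getD (block : List Int) (s r j : Nat) (hr : r < s) (hj : j < s) (hn : s * s ≤ block.length) :
    (pvChunk block s r).getD j 0 = block.getD (r * s + j) 0 := by
  rw [List.getD_eq_getElem?_getD, List.getD_eq_getElem?_getD]
  unfold pvChunk
  rw [List.getElem?_take_of_lt hj, List.getElem?_drop]

theorem pvMval_eq (block : List Int) (s r c : Nat) (hs : 0 < s) (hr : r < s) (hc : c < s) (hn : s * s ≤ block.length) :
    pvMval block s r c = block.getD (r * s + (c + pvRk block s r) % s) 0 := by
  unfold pvMval
  rw [getD_pvRot s hs _ (chunk_length block s r hr hn) c hc]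
  exact chunk_getD block s r _ hr (Nat.mod_lt _ hs) hn

theorem pvMFval_eq (block : List Int) (s r c : Nat) (hs : 0 < s) (hr : r < s) (hc : c < s) :
    pvMFval block s r c = pvMval block s ((r + pvCk block s c) % s) c := by
  unfold pvMFval
  rw [getD_pvRot s hs _ (by simp [pvColM]) r hr]
  unfold pvColM
  rw [PySem.List.getD_map_range _ s _ 0 (Nat.mod_lt _ hs)]
  rfl

theorem rk_cast (block : List Int) (s r : Nat) (hs : 0 < s) :
    ((pvRk block s r : Nat) : Int) = PySem.Int.mod (pvChunk block s r).sum (s : Int) := by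
  have hsp : (0 : Int) < (s : Int) := by exact_mod_cast hs
  exact Int.toNat_of_nonneg (PySem.Int.mod_nonneg _ hsp)

theorem ck_cast (block : List Int) (s c : Nat) (hs : 0 < s) :
    ((pvCk block s c : Nat) : Int) = PySem.Int.mod (pvColM block s c).sum (s : Int) := by
  have hsp : (0 : Int) < (s : Int) := by exact_mod_cast hs
  exact Int.toNat_of_nonneg (PySem.Int.mod_nonneg _ hsp)

theorem rshift_eq (block : List Int) (s : Nat) (hs : 0 < s) :
    (PySem.List.pyRange 0 (s : Int) 1).map (fun r =>
        PySem.Int.mod (PySem.List.slice block (some (r * (s : Int))) (some ((r + 1) * (s : Int)))).sum (s : Int))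
      = (List.range s).map (fun r => ((pvRk block s r : Nat) : Int)) := by
  rw [pvRange_cast]
  rw [List.map_map]
  apply List.map_congr_left
  intro r hr
  simp only [Function.comp_def]
  rw [← Nat.cast_add_one, ← Nat.cast_mul, ← Nat.cast_mul, PySem.List.slice_natCast]
  rw [rk_cast block s r hs]
  unfold pvChunk
  congr 2
  rw [Nat.succ_mul, Nat.add_sub_cancel_left]

theorem getD_rkList (block : List Int) (s r : Nat) (hs : 0 < s) (hr : r < s) :
    PySem.List.pyGetD ((List.range s).map (fun r => ((pvRk block s r : Nat) : Int))) ((r : Nat) : Int) 0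
      = ((pvRk block s r : Nat) : Int) := by
  rw [PySem.List.pyGetD_natCast]
  exact PySem.List.getD_map_range _ s r 0 hr

theorem inner_idx (block : List Int) (s r c : Nat) (hs : 0 < s) (hr : r < s) (hc : c < s) (hn : s * s ≤ block.length) :
    PySem.List.pyGetD block (((r : Nat) : Int) * (s : Int)
        + PySem.Int.mod (((c : Nat) : Int) + ((pvRk block s r : Nat) : Int)) (s : Int)) 0
      = pvMval block s r c := by
  have h1 : ((c : Nat) : Int) + ((pvRk block s r : Nat) : Int) = (((c + pvRk block s r : Nat)) : Int) := by
    push_cast; ring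
  rw [h1, natMod_cast _ s hs]
  have h2 : ((r : Nat) : Int) * (s : Int) + (((c + pvRk block s r) % s : Nat) : Int)
      = (((r * s + (c + pvRk block s r) % s : Nat)) : Int) := by
    push_cast; ring
  rw [h2, PySem.List.pyGetD_natCast]
  exact (pvMval_eq block s r c hs hr hc hn).symm

theorem cshift_eq (block : List Int) (s : Nat) (hs : 0 < s) (hn : s * s ≤ block.length) :
    (PySem.List.pyRange 0 (s : Int) 1).map (fun c =>
        PySem.Int.mod ((PySem.List.pyRange 0 (s : Int) 1).map (fun r =>
          PySem.List.pyGetD block (r * (s : Int)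
            + PySem.Int.mod (c + PySem.List.pyGetD ((List.range s).map (fun r => ((pvRk block s r : Nat) : Int))) r 0) (s : Int)) 0)).sum (s : Int))
      = (List.range s).map (fun c => ((pvCk block s c : Nat) : Int)) := by
  rw [pvRange_cast, List.map_map]
  apply List.map_congr_left
  intro c hc
  have hcs : c < s := List.mem_range.mp hc
  simp only [Function.comp_def]
  rw [List.map_map]
  rw [ck_cast block s c hs]
  congr 1
  unfold pvColM
  simp only [Function.comp_def]
  apply congrArg
  apply List.map_congr_left
  intro r hr
  have hrs : r < s := List.mem_range.mp hr
  rw [getD_rkList block s r hs hrs]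
  exact inner_idx block s r c hs hrs hcs hn

theorem portB_eq (block : List Int) (hs : 0 < Nat.sqrt block.length) :
    rook_diffusion_py_alt block =
      ((List.range (Nat.sqrt block.length)).map
          (pvMrow block (Nat.sqrt block.length) (Nat.sqrt block.length))).flatten
        ++ block.drop (Nat.sqrt block.length * Nat.sqrt block.length) := by
  set s := Nat.sqrt block.length with hsdef
  have hn : s * s ≤ block.length := Nat.sqrt_le block.length
  simp only [rook_diffusion_py_alt, ← hsdef, if_neg (by omega : ¬ s = 0)]
  rw [rshift_eq block s hs, cshift_eq block s hs hn]
  congr 1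
  · rw [pvRange_cast, List.flatMap_map]
    rw [List.flatMap_def]
    apply congrArg
    apply List.map_congr_left
    intro r hr
    have hrs : r < s := List.mem_range.mp hr
    rw [List.map_map]
    unfold pvMrow
    apply List.map_congr_left
    intro c hc
    have hcs : c < s := List.mem_range.mp hc
    rw [if_pos hcs]
    simp only [Function.comp_def]
    rw [PySem.List.pyGetD_natCast, PySem.List.getD_map_range _ s c 0 hcs]
    have h1 : ((r : Nat) : Int) + ((pvCk block s c : Nat) : Int) = (((r + pvCk block s c : Nat)) : Int) := by
      push_cast; ring
    rw [h1, natMod_cast _ s hs]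
    set r2 := (r + pvCk block s c) % s with hr2
    have hr2s : r2 < s := Nat.mod_lt _ hs
    rw [getD_rkList block s r2 hs hr2s]
    rw [inner_idx block s r2 c hs hr2s hcs hn]
    rw [pvMFval_eq block s r c hs hrs hcs, ← hr2]
  · rw [PySem.List.slice_from_natCast]

theorem main_eq (block : List Int) : rook_diffusion_py block = rook_diffusion_py_alt block := by
  by_cases hs0 : Nat.sqrt block.length = 0
  · rw [portA_eq]
    simp [rook_diffusion_py_alt, hs0]
  · have hs : 0 < Nat.sqrt block.length := by omega
    set s := Nat.sqrt block.length with hsdef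
    have hn : s * s ≤ block.length := Nat.sqrt_le block.length
    rw [portA_eq, portB_eq block hs, ← hsdef]
    have hrow : (List.range s).foldl (pvRowStep s) block = pvRotChunks s s block := by
      have h := rowloop s hs s 0 [] block (by simp) hn
      simpa [List.range_eq_range'] using h
    have hrc : pvRotChunks s s block
        = ((List.range s).map (pvMrow block s 0)).flatten ++ block.drop (s * s) := by
      have h := rotChunks_eq s block s 0
      simp only [Nat.zero_mul, List.drop_zero, Nat.zero_add] at h
      rw [h, ← List.range_eq_range']
      congr 1
      apply congrArg
      apply List.map_congr_left
      intro r hr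
      exact (mrow_zero block s r (List.mem_range.mp hr) hn).symm
    rw [hrow, hrc]
    have h := colphase block s hs (block.drop (s * s)) s 0 (by omega)
    simpa [List.range_eq_range'] using h

-- ===== VERDICT (by name: the statement is the Claim_ definition above) =====
theorem rook_diffusion_py_spec : Claim_equal_rook_diffusion_py := by
  intro block _
  show rook_diffusion_py block = rook_diffusion_py_alt block
  exact main_eq block
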